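-- pv_equiv track=rewrite | github.com/Toms-Berzins/ProScrape | utils/language_detection.py | extract_trigrams
-- ===== SOURCE A (Python) =====
-- from collections import Counter, defaultdict
--
-- def extract_trigrams(text: str) -> Counter:
--     """Extract character trigrams from text."""
--     text = text.lower().replace(' ', '')
--     trigrams = []
--
--     for i in range(len(text) - 2):
--         trigram = text[i:i+3]
--         if trigram.isalpha():
--             trigrams.append(trigram)
--
--     return Counter(trigrams)
-- ===== SOURCE B (Python) =====
-- from collections import Counter
--
--
-- def _run_trigrams(run):
--     return [''.join(run[j:j+3]) for j in range(len(run) - 2)]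
--
--
-- def extract_trigrams(text: str) -> Counter:
--     """Extract character trigrams from text (run-based)."""
--     text = text.lower().replace(' ', '')
--     trigrams = []
--     run = []
--     for ch in text:
--         if ch.isalpha():
--             run.append(ch)
--         else:
--             trigrams.extend(_run_trigrams(run))
--             run = []
--     trigrams.extend(_run_trigrams(run))
--     return Counter(trigrams)
-- ===== Notes on version B (the rewrite author's own statement) =====
-- stated objective: alternative
-- what changed: B segments the preprocessed text into maximal runs of alphabetic characters with a single per-character isalpha scan and emits all trigrams inside each run, instead of slicing every overlapping 3-character window and testing it with str.isalpha.
import Mathlib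
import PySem

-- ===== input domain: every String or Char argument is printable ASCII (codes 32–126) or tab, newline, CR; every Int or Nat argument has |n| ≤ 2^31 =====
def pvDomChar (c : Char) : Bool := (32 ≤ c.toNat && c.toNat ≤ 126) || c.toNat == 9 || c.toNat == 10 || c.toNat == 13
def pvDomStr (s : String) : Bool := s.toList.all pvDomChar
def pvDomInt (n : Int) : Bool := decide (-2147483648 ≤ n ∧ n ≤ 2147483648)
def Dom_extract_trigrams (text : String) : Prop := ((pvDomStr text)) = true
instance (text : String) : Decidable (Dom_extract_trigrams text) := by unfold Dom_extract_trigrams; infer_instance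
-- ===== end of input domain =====

-- B replaces A's per-window slice-and-str.isalpha test by a single per-character scan that
-- collects maximal alphabetic runs and emits the trigrams inside each run (objective: alternative).

-- ===== PORT A =====
def extract_trigrams (text : String) : List (String × Int) :=
  -- text = text.lower().replace(' ', '')
  let t : List Char := PySem.Chars.replace (PySem.Chars.lower text.toList) [' '] []
  -- for i in range(len(text) - 2): trigram = text[i:i+3]; if trigram.isalpha(): trigrams.append(trigram)
  let trigrams : List String :=
    (PySem.List.pyRange 0 ((t.length : Int) - 2) 1).foldl
      (fun acc i =>
        let tri := PySem.List.slice t (some i) (some (i + 3))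
        if PySem.Chars.strIsalpha tri then acc ++ [String.ofList tri] else acc) []
  -- return Counter(trigrams)
  (PySem.Dict.counter trigrams).items

-- ===== PORT B =====
-- _run_trigrams(run) = [''.join(run[j:j+3]) for j in range(len(run) - 2)]
def pvRunTrigrams (run : List Char) : List String :=
  (PySem.List.pyRange 0 ((run.length : Int) - 2) 1).map
    (fun j => String.ofList (PySem.List.slice run (some j) (some (j + 3))))

def extract_trigrams_alt (text : String) : List (String × Int) :=
  let t : List Char := PySem.Chars.replace (PySem.Chars.lower text.toList) [' '] []
  -- for ch in text: if ch.isalpha(): run.append(ch) else: trigrams.extend(_run_trigrams(run)); run = []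
  let st : List Char × List String :=
    t.foldl
      (fun st ch =>
        if PySem.Chars.isalpha ch then (st.1 ++ [ch], st.2)
        else ([], st.2 ++ pvRunTrigrams st.1)) ([], [])
  -- trigrams.extend(_run_trigrams(run)); return Counter(trigrams)
  (PySem.Dict.counter (st.2 ++ pvRunTrigrams st.1)).items

-- ===== PRECONDITION & SPEC =====
def Spec_extract_trigrams (text : String) (out : List (String × Int)) : Prop := out = extract_trigrams_alt text
instance (text : String) (out : List (String × Int)) : Decidable (Spec_extract_trigrams text out) := by unfold Spec_extract_trigrams; infer_instance

-- ===== CLAIM (what is proved, stated in full; the proofs are below) =====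
def Claim_equal_extract_trigrams : Prop := ∀ (text : String), Dom_extract_trigrams text → Spec_extract_trigrams text (extract_trigrams text)

-- ===== LEMMAS AND PROOFS =====

-- the 3-window at the head of a :: rest (empty if fewer than 3 chars or not all alphabetic)
def pvHeadWin (a : Char) (rest : List Char) : List String :=
  match rest with
  | b :: c :: _ => if PySem.Chars.strIsalpha [a, b, c] then [String.ofList [a, b, c]] else []
  | _ => []

-- the filtered window list, recursively: proof-side characterisation both ports are reduced to
def pvWin : List Char → List String
  | [] => []
  | a :: rest => pvHeadWin a rest ++ pvWin rest

lemma pvStrIsalpha_eq (cs : List Char) :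
    PySem.Chars.strIsalpha cs = (!cs.isEmpty && cs.all PySem.Chars.isalpha) := by
  simp [PySem.Chars.strIsalpha]

lemma pvSlice3 (t : List Char) (k : Nat) :
    PySem.List.slice t (some (k : Int)) (some ((k : Int) + 3)) = (t.drop k).take 3 := by
  have h : ((k : Int) + 3) = ((k + 3 : Nat) : Int) := by push_cast; ring
  rw [h, PySem.List.slice_natCast]
  congr 1
  omega

lemma pvWin_eq (t : List Char) :
    ((List.range (t.length - 2)).filter
        (fun k => PySem.Chars.strIsalpha ((t.drop k).take 3))).map
      (fun k => String.ofList ((t.drop k).take 3)) = pvWin t := by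
  induction t with
  | nil => rfl
  | cons a rest ih =>
      rw [pvWin]
      by_cases h2 : 2 ≤ rest.length
      · rw [show (a :: rest).length - 2 = (rest.length - 2) + 1 by simp; omega,
          List.range_succ_eq_map]
        simp only [List.filter_cons, List.filter_map, Function.comp_def, List.drop_zero,
          List.drop_succ_cons, List.take_succ_cons]
        rw [← ih]
        have hh : pvHeadWin a rest =
            if PySem.Chars.strIsalpha (a :: rest.take 2) then
              [String.ofList (a :: rest.take 2)] else [] := by
          match rest, h2 with
          | b :: c :: _, _ => simp [pvHeadWin]
        rw [hh]
        split_ifs <;>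
          simp [Function.comp_def, List.drop_succ_cons, List.take_succ_cons]
      · have h0 : (a :: rest).length - 2 = 0 := by simp; omega
        rw [h0]
        have hh : pvHeadWin a rest = [] := by
          match rest, h2 with
          | [], _ => rfl
          | [b], _ => rfl
        rw [← ih, show rest.length - 2 = 0 by omega]
        simp [hh]

-- A's trigram list as the filtered window list
lemma pvA_windows (t : List Char) :
    (PySem.List.pyRange 0 ((t.length : Int) - 2) 1).foldl
      (fun acc i =>
        let tri := PySem.List.slice t (some i) (some (i + 3))
        if PySem.Chars.strIsalpha tri then acc ++ [String.ofList tri] else acc) [] =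
    ((List.range (t.length - 2)).filter
        (fun k => PySem.Chars.strIsalpha ((t.drop k).take 3))).map
      (fun k => String.ofList ((t.drop k).take 3)) := by
  rw [PySem.List.pyRange_one, PySem.List.foldl_append_if]
  have h3 : ((t.length : Int) - 2 - 0).toNat = t.length - 2 := by omega
  simp only [h3, Int.zero_add, List.filter_map, List.map_map, Function.comp_def, List.nil_append,
    pvSlice3]

lemma pvHeadWin_alpha_false (a : Char) (rest : List Char)
    (h : ∃ x ∈ a :: rest.take 2, PySem.Chars.isalpha x = false) :
    pvHeadWin a rest = [] := by
  match rest with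
  | [] => rfl
  | [b] => rfl
  | b :: c :: zs =>
      obtain ⟨x, hx, hxf⟩ := h
      simp only [pvHeadWin, pvStrIsalpha_eq]
      have : ¬ ([a, b, c].all PySem.Chars.isalpha = true) := by
        simp only [List.take_succ_cons, List.take_zero] at hx
        simp only [List.all_cons, List.all_nil, Bool.and_eq_true]
        intro ⟨h1, h2, h3, _⟩
        simp only [List.mem_cons, List.not_mem_nil, or_false] at hx
        rcases hx with rfl | rfl | rfl <;> simp_all
      simp [this]

-- a non-alphabetic character cuts the window list in two
lemma pvWin_split (run : List Char) (c : Char) (cs : List Char)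
    (hr : run.all PySem.Chars.isalpha) (hc : PySem.Chars.isalpha c = false) :
    pvWin (run ++ c :: cs) = pvWin run ++ pvWin cs := by
  induction run with
  | nil =>
      simp only [List.nil_append, pvWin]
      rw [pvHeadWin_alpha_false c cs ⟨c, by simp, hc⟩]
      simp
  | cons a run' ih =>
      simp only [List.all_cons, Bool.and_eq_true] at hr
      have hhead : pvHeadWin a (run' ++ c :: cs) = pvHeadWin a run' := by
        by_cases h2 : 2 ≤ run'.length
        · obtain ⟨b, d, r, rfl⟩ : ∃ b d r, run' = b :: d :: r := by
            match run', h2 with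
            | b :: d :: r, _ => exact ⟨b, d, r, rfl⟩
          simp [pvHeadWin]
        · match run' with
          | [] =>
              simp only [List.nil_append]
              rw [pvHeadWin_alpha_false a (c :: cs) ⟨c, by simp, hc⟩]
              rfl
          | [b] =>
              simp only [List.cons_append, List.nil_append]
              rw [pvHeadWin_alpha_false a (b :: c :: cs) ⟨c, by simp, hc⟩]
              rfl
          | b :: d :: r => exact absurd (by simp) h2
      simp only [List.cons_append, pvWin, ih hr.2, hhead, List.append_assoc]

-- on an all-alphabetic run every window survives the filter
lemma pvRunTrigrams_eq (run : List Char) (h : run.all PySem.Chars.isalpha) :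
    pvRunTrigrams run = pvWin run := by
  unfold pvRunTrigrams
  rw [PySem.List.pyRange_one]
  have h3 : ((run.length : Int) - 2 - 0).toNat = run.length - 2 := by omega
  simp only [h3, Int.zero_add, List.map_map, Function.comp_def, pvSlice3]
  rw [← pvWin_eq]
  congr 1
  symm
  apply List.filter_eq_self.mpr
  intro k hk
  simp only [List.mem_range] at hk
  rw [pvStrIsalpha_eq]
  simp only [Bool.and_eq_true, Bool.not_eq_eq_eq_not, Bool.not_true]
  constructor
  · have hne : (run.drop k).take 3 ≠ [] := by
      intro he
      have := congrArg List.length he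
      simp at this
      omega
    simp [hne]
  · apply List.all_eq_true.mpr
    intro x hx
    exact List.all_eq_true.mp h x (List.mem_of_mem_drop (List.mem_of_mem_take hx))

-- loop invariant of B's run-collecting fold
lemma pvB_invariant (cs : List Char) (run : List Char) (tris : List String)
    (hr : run.all PySem.Chars.isalpha) :
    (cs.foldl
      (fun st ch =>
        if PySem.Chars.isalpha ch then (st.1 ++ [ch], st.2)
        else ([], st.2 ++ pvRunTrigrams st.1)) (run, tris)).2 ++
      pvRunTrigrams (cs.foldl
      (fun st ch =>
        if PySem.Chars.isalpha ch then (st.1 ++ [ch], st.2)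
        else ([], st.2 ++ pvRunTrigrams st.1)) (run, tris)).1 =
    tris ++ pvWin (run ++ cs) := by
  induction cs generalizing run tris with
  | nil => simp [pvRunTrigrams_eq run hr]
  | cons ch cs' ih =>
      simp only [List.foldl_cons]
      by_cases hch : PySem.Chars.isalpha ch
      · rw [if_pos hch]
        have hr' : (run ++ [ch]).all PySem.Chars.isalpha := by
          simp_all
        simpa [List.append_assoc] using ih (run ++ [ch]) tris hr'
      · rw [if_neg hch]
        have h := ih [] (tris ++ pvRunTrigrams run) rfl
        simp only [List.nil_append] at h
        rw [h, pvRunTrigrams_eq run hr,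
          pvWin_split run ch cs' hr (Bool.eq_false_iff.mpr hch), List.append_assoc]

-- ===== VERDICT (by name: the statement is the Claim_ definition above) =====
theorem extract_trigrams_spec : Claim_equal_extract_trigrams := by
  intro text _
  unfold Spec_extract_trigrams extract_trigrams extract_trigrams_alt
  have hA := pvA_windows (PySem.Chars.replace (PySem.Chars.lower text.toList) [' '] [])
  have hB := pvB_invariant (PySem.Chars.replace (PySem.Chars.lower text.toList) [' '] []) [] []
    (by simp)
  simp only [hA, pvWin_eq, hB, List.nil_append]
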